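-- pv_equiv track=rewrite | github.com/sasori-s/Problem-Solving-2023 | TechieDelight/problem12.py | findIndexofZero
-- ===== SOURCE A (Python) =====
-- def findIndexofZero(A):
--      max_count = 0
--      max_index = -1
--      count = 0
--      prev_zero = -1
--
--      for i in range(len(A)):
--         if A[i] == 1:
--             count += 1
--
--         else:
--             count = i - prev_zero
--             prev_zero = i
--
--         if count > max_count:
--             max_count = count
--             max_index = prev_zero
--
--      return max_index
-- ===== SOURCE B (Python) =====
-- def findIndexofZero(A):
--     n = len(A)
--     zeros = [i for i, x in enumerate(A) if x != 1]
--     best_count = 0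
--     best_index = -1
--     prev = -1
--     for j in range(len(zeros)):
--         z = zeros[j]
--         nxt = zeros[j + 1] if j + 1 < len(zeros) else n
--         cand = nxt - prev - 1
--         if cand > best_count:
--             best_count = cand
--             best_index = z
--         prev = z
--     return best_index
-- ===== Notes on version B (the rewrite author's own statement) =====
-- stated objective: alternative
-- what changed: Replaces A's single streaming counter/prev-zero state machine with a two-phase algorithm: first collect the positions of all non-one elements, then score each such position z by nextzero - prevzero - 1 and keep the first strict maximum.
import Mathlib
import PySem

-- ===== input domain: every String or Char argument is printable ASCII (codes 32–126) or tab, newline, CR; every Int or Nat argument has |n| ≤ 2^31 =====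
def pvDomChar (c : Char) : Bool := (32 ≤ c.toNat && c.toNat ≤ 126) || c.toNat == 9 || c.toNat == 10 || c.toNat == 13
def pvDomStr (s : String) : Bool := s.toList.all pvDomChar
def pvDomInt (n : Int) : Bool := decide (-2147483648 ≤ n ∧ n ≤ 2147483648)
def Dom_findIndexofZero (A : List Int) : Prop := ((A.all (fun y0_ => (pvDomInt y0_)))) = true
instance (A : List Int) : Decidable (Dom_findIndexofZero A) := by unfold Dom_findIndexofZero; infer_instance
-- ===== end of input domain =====

-- B replaces A's single streaming counter with a two-phase algorithm (collect the positions of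
-- the non-one elements, then score each such position by its neighbouring zero positions);
-- objective: alternative decomposition, same O(n) cost.

-- ===== PORT A =====
-- the for-loop over range(len(A)) with A[i], as a structural recursion carrying the index i
def findIndexofZeroGo (i max_count max_index count prev_zero : Int) :
    List Int → Int
  | [] => max_index
  | x :: rest =>
    let count' := if x = 1 then count + 1 else i - prev_zero
    let prev_zero' := if x = 1 then prev_zero else i
    if count' > max_count then
      findIndexofZeroGo (i + 1) count' prev_zero' count' prev_zero' rest
    else
      findIndexofZeroGo (i + 1) max_count max_index count' prev_zero' rest

def findIndexofZero (A : List Int) : Int :=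
  findIndexofZeroGo 0 0 (-1) 0 (-1) A

-- ===== PORT B =====
-- the for-loop over the zeros list; zeros[j+1] if j+1 < len(zeros) else n becomes a peek at the tail
def findIndexofZeroAltGo (n prev best_count best_index : Int) :
    List Int → Int
  | [] => best_index
  | z :: zs =>
    let nxt := match zs with | [] => n | w :: _ => w
    let cand := nxt - prev - 1
    if cand > best_count then findIndexofZeroAltGo n z cand z zs
    else findIndexofZeroAltGo n z best_count best_index zs

def findIndexofZero_alt (A : List Int) : Int :=
  let zeros : List Int :=
    (PySem.List.enumerate A).filterMap (fun p => if p.2 ≠ 1 then some p.1 else none)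
  findIndexofZeroAltGo (A.length : Int) (-1) 0 (-1) zeros

-- ===== PRECONDITION & SPEC =====
def Spec_findIndexofZero (A : List Int) (out : Int) : Prop := out = findIndexofZero_alt A
instance (A : List Int) (out : Int) : Decidable (Spec_findIndexofZero A out) := by unfold Spec_findIndexofZero; infer_instance

-- ===== CLAIM (what is proved, stated in full; the proofs are below) =====
def Claim_equal_findIndexofZero : Prop := ∀ (A : List Int), Dom_findIndexofZero A → Spec_findIndexofZero A (findIndexofZero A)

-- ===== LEMMAS AND PROOFS =====

-- the indices (from offset j) of the non-one elements
def pvZerosFrom (j : Int) : List Int → List Int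
  | [] => []
  | x :: l => if x = 1 then pvZerosFrom (j + 1) l else j :: pvZerosFrom (j + 1) l

theorem pvZerosFrom_mem :
    ∀ (l : List Int) (j z : Int), z ∈ pvZerosFrom j l → j ≤ z ∧ z < j + l.length := by
  intro l
  induction l with
  | nil => intro j z h; simp [pvZerosFrom] at h
  | cons x l ih =>
    intro j z h
    simp only [pvZerosFrom] at h
    by_cases hx : x = 1
    · simp only [if_pos hx] at h
      have := ih (j + 1) z h
      constructor
      · omega
      · simp only [List.length_cons]; push_cast; omega
    · simp only [if_neg hx, List.mem_cons] at h
      rcases h with h | h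
      · subst h
        constructor
        · omega
        · simp only [List.length_cons]; push_cast; omega
      · have := ih (j + 1) z h
        constructor
        · omega
        · simp only [List.length_cons]; push_cast; omega

theorem pvZeros_eq_filterMap :
    ∀ (l : List Int) (j : Int),
      (PySem.List.enumerate l j).filterMap (fun p => if p.2 ≠ 1 then some p.1 else none)
        = pvZerosFrom j l := by
  intro l
  induction l with
  | nil => intro j; simp [PySem.List.enumerate_nil, pvZerosFrom]
  | cons x l ih =>
    intro j
    simp only [PySem.List.enumerate_cons, List.filterMap_cons, pvZerosFrom]
    by_cases hx : x = 1
    · simpa [hx] using ih (j + 1)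
    · simpa [hx] using ih (j + 1)

-- one-step equations for B's scan, to unfold it one round at a time
theorem pvFB_nil (n prev bc bi : Int) :
    findIndexofZeroAltGo n prev bc bi [] = bi := rfl

theorem pvFB_one (n prev bc bi z : Int) :
    findIndexofZeroAltGo n prev bc bi [z]
      = if n - prev - 1 > bc then z else bi := by
  by_cases h : n - prev - 1 > bc <;> simp [findIndexofZeroAltGo, h]

theorem pvFB_cons2 (n prev bc bi z w : Int) (ws : List Int) :
    findIndexofZeroAltGo n prev bc bi (z :: w :: ws)
      = if w - prev - 1 > bc then findIndexofZeroAltGo n z (w - prev - 1) z (w :: ws)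
        else findIndexofZeroAltGo n z bc bi (w :: ws) := rfl

-- absorbing an incremental max update of A into the collapsed per-zero scan:
-- with every later candidate at least mc', raising mc to mc' while setting the best index to q
-- does not change the result
theorem pvGo_absorb (n p q mc mc' mi : Int) (zs : List Int)
    (hhead : ∀ z zs', zs = z :: zs' → mc' ≤ z - p - 1)
    (hn : mc' ≤ n - p - 1) (hlt : mc < mc') :
    findIndexofZeroAltGo n p mc mi (q :: zs)
      = findIndexofZeroAltGo n p mc' q (q :: zs) := by
  cases zs with
  | nil =>
    rw [pvFB_one, pvFB_one, if_pos (by omega)]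
    by_cases h2 : n - p - 1 > mc'
    · rw [if_pos h2]
    · rw [if_neg h2]
  | cons z zs' =>
    have hz := hhead z zs' rfl
    rw [pvFB_cons2, pvFB_cons2, if_pos (by omega)]
    by_cases h2 : z - p - 1 > mc'
    · rw [if_pos h2]
    · rw [if_neg h2]
      have : mc' = z - p - 1 := by omega
      rw [this]

-- main invariant: A's streaming loop from index i, with last zero q, zero-before-last p,
-- running count i - 1 - p and max so far mc ≥ i - 1 - p, equals B's per-zero scan started
-- at the pending zero q over the remaining zero positions
theorem pvMain :
    ∀ (l : List Int) (i p q mc mi : Int),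
      p ≤ q → q < i → i - 1 - p ≤ mc →
      findIndexofZeroGo i mc mi (i - 1 - p) q l
        = findIndexofZeroAltGo ((i + l.length : Int)) p mc mi (q :: pvZerosFrom i l) := by
  intro l
  induction l with
  | nil =>
    intro i p q mc mi hpq hqi hmc
    simp only [findIndexofZeroGo, pvZerosFrom, List.length_nil]
    rw [pvFB_one, if_neg (by push_cast; omega)]
  | cons x l ih =>
    intro i p q mc mi hpq hqi hmc
    simp only [findIndexofZeroGo, pvZerosFrom, List.length_cons]
    have hN : (i + ((l.length + 1 : Nat) : Int)) = (i + 1) + (l.length : Int) := by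
      push_cast; omega
    by_cases hx : x = 1
    · -- a one: count becomes i - p, prev_zero stays q
      simp only [if_pos hx]
      have hc : i - 1 - p + 1 = (i + 1) - 1 - p := by omega
      rw [hc]
      by_cases hupd : (i + 1) - 1 - p > mc
      · rw [if_pos hupd]
        rw [ih (i + 1) p q ((i + 1) - 1 - p) q (by omega) (by omega) (by omega)]
        rw [hN]
        refine (pvGo_absorb ((i + 1) + (l.length : Int)) p q mc ((i + 1) - 1 - p) mi
          (pvZerosFrom (i + 1) l) ?_ (by omega) (by omega)).symm
        intro z zs' hzs
        have hz : z ∈ pvZerosFrom (i + 1) l := by rw [hzs]; exact List.mem_cons_self ..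
        have := (pvZerosFrom_mem l (i + 1) z hz).1
        omega
      · rw [if_neg hupd]
        rw [ih (i + 1) p q mc mi (by omega) (by omega) (by omega)]
        rw [hN]
    · -- a zero at i: count becomes i - q, prev_zero becomes i
      simp only [if_neg hx]
      -- B side: the candidate of q is i - p - 1 ≤ mc, so no update, and the scan advances to zero i
      have hBstep :
          findIndexofZeroAltGo (i + ((l.length + 1 : Nat) : Int)) p mc mi
              (q :: i :: pvZerosFrom (i + 1) l)
            = findIndexofZeroAltGo ((i + 1) + (l.length : Int)) q mc mi
              (i :: pvZerosFrom (i + 1) l) := by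
        rw [pvFB_cons2, if_neg (by omega), hN]
      have hc : i - q = (i + 1) - 1 - q := by omega
      rw [hc]
      by_cases hupd : (i + 1) - 1 - q > mc
      · rw [if_pos hupd]
        rw [ih (i + 1) q i ((i + 1) - 1 - q) i (by omega) (by omega) (by omega)]
        rw [hBstep]
        refine (pvGo_absorb ((i + 1) + (l.length : Int)) q i mc ((i + 1) - 1 - q) mi
          (pvZerosFrom (i + 1) l) ?_ (by omega) (by omega)).symm
        intro z zs' hzs
        have hz : z ∈ pvZerosFrom (i + 1) l := by rw [hzs]; exact List.mem_cons_self ..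
        have := (pvZerosFrom_mem l (i + 1) z hz).1
        omega
      · rw [if_neg hupd]
        rw [ih (i + 1) q i mc mi (by omega) (by omega) (by omega)]
        rw [hBstep]

-- the zero positions are strictly increasing
theorem pvZerosFrom_pairwise :
    ∀ (l : List Int) (j : Int), (pvZerosFrom j l).Pairwise (· < ·) := by
  intro l
  induction l with
  | nil => intro j; simp [pvZerosFrom]
  | cons x l ih =>
    intro j
    simp only [pvZerosFrom]
    by_cases hx : x = 1
    · simp only [if_pos hx]; exact ih (j + 1)
    · simp only [if_neg hx]
      refine List.pairwise_cons.mpr ⟨?_, ih (j + 1)⟩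
      intro y hy
      have := (pvZerosFrom_mem l (j + 1) y hy).1
      omega

-- the pending sentinel zero -1 at the start of B's scan is harmless: either it makes no
-- update, or it only raises best_count to the length of the leading ones run, which the
-- first real zero always strictly beats
theorem pvSentinel (A : List Int) :
    findIndexofZeroAltGo (A.length : Int) (-1) 0 (-1) ((-1) :: pvZerosFrom 0 A)
      = findIndexofZeroAltGo (A.length : Int) (-1) 0 (-1) (pvZerosFrom 0 A) := by
  cases hz : pvZerosFrom 0 A with
  | nil =>
    rw [pvFB_one, pvFB_nil]
    split_ifs <;> rfl
  | cons z0 zs' =>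
    have hz0 : 0 ≤ z0 ∧ z0 < (A.length : Int) := by
      have : z0 ∈ pvZerosFrom 0 A := by rw [hz]; exact List.mem_cons_self ..
      have h := pvZerosFrom_mem A 0 z0 this
      constructor <;> omega
    rw [pvFB_cons2]
    by_cases h0 : z0 - (-1) - 1 > 0
    · rw [if_pos h0]
      have hz0' : z0 - (-1) - 1 = z0 := by omega
      rw [hz0']
      cases zs' with
      | nil =>
        rw [pvFB_one, pvFB_one, if_pos (by omega), if_pos (by omega)]
      | cons z1 zs'' =>
        have h01 : z0 < z1 := by
          have hp := pvZerosFrom_pairwise A 0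
          rw [hz] at hp
          exact (List.pairwise_cons.mp hp).1 z1 (by simp)
        rw [pvFB_cons2, pvFB_cons2, if_pos (by omega), if_pos (by omega)]
    · rw [if_neg h0]

-- ===== VERDICT (by name: the statement is the Claim_ definition above) =====
theorem findIndexofZero_spec : Claim_equal_findIndexofZero := by
  intro A _
  unfold Spec_findIndexofZero findIndexofZero findIndexofZero_alt
  rw [pvZeros_eq_filterMap]
  have h := pvMain A 0 (-1) (-1) 0 (-1) (by omega) (by omega) (by omega)
  have h0 : (0 : Int) - 1 - (-1) = 0 := by omega
  rw [h0] at h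
  have hn : ((0 : Int) + (A.length : Int)) = (A.length : Int) := by omega
  rw [hn] at h
  rw [h, pvSentinel]
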